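-- pv_equiv track=rewrite | github.com/Onizuka121/logic-builder | thrue-table-gen.py | get_binary_conv
-- ===== SOURCE A (Python) =====
-- def get_binary_conv(l1,l2=[]):
--     t = 0
--     c = len(l1)+len(l2)-1
--     for l in [l1,l2]:
--         for bit in l:
--             t += bit*(2**c)
--             c-=1
--
--     return t
-- ===== SOURCE B (Python) =====
-- def get_binary_conv(l1, l2=[]):
--     t = 0
--     for l in [l1, l2]:
--         for bit in l:
--             t = t * 2 + bit
--     return t
-- ===== Notes on version B (the rewrite author's own statement) =====
-- stated objective: faster
-- what changed: Replaces the length-derived descending position counter and per-bit 2**c exponentiation with Horner's rule, maintaining one running accumulator t = t*2 + bit.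
import Mathlib
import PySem

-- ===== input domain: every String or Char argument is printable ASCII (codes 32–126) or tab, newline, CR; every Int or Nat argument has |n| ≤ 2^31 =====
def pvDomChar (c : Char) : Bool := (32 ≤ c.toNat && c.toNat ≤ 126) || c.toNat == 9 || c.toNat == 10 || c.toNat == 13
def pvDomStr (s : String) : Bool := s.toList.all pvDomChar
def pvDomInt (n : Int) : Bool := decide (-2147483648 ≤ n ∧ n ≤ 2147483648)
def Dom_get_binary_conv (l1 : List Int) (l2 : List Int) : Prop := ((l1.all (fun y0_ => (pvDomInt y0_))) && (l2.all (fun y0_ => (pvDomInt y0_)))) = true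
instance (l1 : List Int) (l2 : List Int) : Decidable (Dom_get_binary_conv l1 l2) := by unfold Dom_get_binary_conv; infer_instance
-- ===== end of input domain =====

-- B replaces the position counter c and per-bit 2**c exponentiation with Horner's rule (simpler).


-- ===== PORT A =====
-- one inner-loop step of A: t += bit * 2**c; c -= 1   (c ≥ 0 whenever the loop runs, so 2**c via toNat is exact)
def pvAStep (s : Int × Int) (bit : Int) : Int × Int := (s.1 + bit * 2 ^ s.2.toNat, s.2 - 1)

def get_binary_conv (l1 : List Int) (l2 : List Int) : Int :=
  let c0 : Int := (l1.length : Int) + (l2.length : Int) - 1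
  ([l1, l2].foldl (fun s l => l.foldl pvAStep s) ((0 : Int), c0)).1

-- ===== PORT B =====
def get_binary_conv_alt (l1 : List Int) (l2 : List Int) : Int :=
  [l1, l2].foldl (fun t l => l.foldl (fun t bit => t * 2 + bit) t) 0

-- ===== PRECONDITION & SPEC =====
def Spec_get_binary_conv (l1 : List Int) (l2 : List Int) (out : Int) : Prop := out = get_binary_conv_alt l1 l2
instance (l1 : List Int) (l2 : List Int) (out : Int) : Decidable (Spec_get_binary_conv l1 l2 out) := by unfold Spec_get_binary_conv; infer_instance

-- ===== CLAIM (what is proved, stated in full; the proofs are below) =====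
def Claim_equal_get_binary_conv : Prop := ∀ (l1 : List Int) (l2 : List Int), Dom_get_binary_conv l1 l2 → Spec_get_binary_conv l1 l2 (get_binary_conv l1 l2)

-- ===== LEMMAS AND PROOFS =====

-- Horner fold with arbitrary seed in terms of the zero-seed fold
theorem horner_seed (l : List Int) (t : Int) :
    l.foldl (fun t bit => t * 2 + bit) t
      = t * 2 ^ l.length + l.foldl (fun t bit => t * 2 + bit) 0 := by
  induction l generalizing t with
  | nil => simp
  | cons b l ih =>
      simp only [List.foldl_cons, List.length_cons]
      rw [ih (t * 2 + b), ih (0 * 2 + b)]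
      ring

-- A's fold with counter c = l.length - 1 + k equals seed + (Horner value) * 2^k, counter ends at k-1
theorem aFold_eq (l : List Int) (t : Int) (k : Nat) :
    l.foldl pvAStep (t, (l.length : Int) - 1 + (k : Int))
      = (t + (l.foldl (fun t bit => t * 2 + bit) 0) * 2 ^ k, (k : Int) - 1) := by
  induction l generalizing t k with
  | nil => simp; omega
  | cons b l ih =>
      simp only [List.foldl_cons, List.length_cons, pvAStep]
      have hc : ((l.length : Int) + 1 - 1 + (k : Int) - 1) = (l.length : Int) - 1 + (k : Int) := by ring
      have hc2 : ((l.length : Int) + 1 - 1 + (k : Int)).toNat = l.length + k := by omega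
      push_cast
      rw [hc, hc2, ih]
      simp only [Prod.mk.injEq, zero_add]
      refine ⟨?_, trivial⟩
      rw [horner_seed l b]
      ring

theorem get_binary_conv_spec : Claim_equal_get_binary_conv := by
  intro l1 l2 _
  show get_binary_conv l1 l2 = get_binary_conv_alt l1 l2
  unfold get_binary_conv get_binary_conv_alt
  simp only [List.foldl_cons, List.foldl_nil]
  have h1 : (l1.length : Int) + (l2.length : Int) - 1 = (l1.length : Int) - 1 + (l2.length : Int) := by ring
  rw [h1, aFold_eq l1 0 l2.length]
  have h2 : ((l2.length : Int)) - 1 = (l2.length : Int) - 1 + ((0 : Nat) : Int) := by simp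
  rw [h2, aFold_eq l2 _ 0, horner_seed l2 (l1.foldl (fun t bit => t * 2 + bit) 0)]
  simp
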